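-- pv_equiv track=rewrite | github.com/RadimPokorny/1BIT2 | ISJ/isj_proj4_xpokorr00.py | to_be_credited_alpha
-- ===== SOURCE A (Python) =====
-- def to_be_credited_alpha(lead_actors: list[str],
--                          actors_in_scenes: list[list[str]]
--                         ) -> list[str]:
--     """Returns the list of cast members that need to be credited at the end
--        (are not among lead actors listed first) in alphabetical order.
--
--     >>> to_be_credited_alpha(['Olivier', 'Caine', 'Channing'], [(1, ['Caine', 'Matthews']), (2, ['Olivier', 'Matthews', 'Martin']), (3, ['Morris', 'Caine', 'Cawthorne'])])
--     ['Cawthorne', 'Martin', 'Matthews', 'Morris']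
--     """
--
--     actors = []
--
--     actors = set()
--
--     for item, group in actors_in_scenes:
--         for actor in group:
--             if actor not in lead_actors:
--                 actors.add(actor)
--
--     return sorted(actors)
-- ===== SOURCE B (Python) =====
-- def to_be_credited_alpha(lead_actors: list[str],
--                          actors_in_scenes: list[list[str]]
--                         ) -> list[str]:
--     """Flatten all scene groups, sort the whole multiset, then make one
--        linear scan that skips leads and suppresses adjacent duplicates
--        (sort-based dedup instead of a hash-set accumulator)."""
--     leads = set(lead_actors)
--     flat = []
--     for _item, group in actors_in_scenes:
--         flat.extend(group)
--     flat.sort()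
--     out = []
--     for a in flat:
--         if a not in leads and (not out or out[-1] != a):
--             out.append(a)
--     return out
-- ===== Notes on version B (the rewrite author's own statement) =====
-- stated objective: faster
-- what changed: B replaces A's hash-set accumulation with a per-element 'not in lead_actors' list scan by a sort-based dedup: flatten all scene groups, sort the whole multiset once, then one linear scan that skips leads (set lookup) and suppresses adjacent duplicates; no set of seen actors is maintained.
import Mathlib
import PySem

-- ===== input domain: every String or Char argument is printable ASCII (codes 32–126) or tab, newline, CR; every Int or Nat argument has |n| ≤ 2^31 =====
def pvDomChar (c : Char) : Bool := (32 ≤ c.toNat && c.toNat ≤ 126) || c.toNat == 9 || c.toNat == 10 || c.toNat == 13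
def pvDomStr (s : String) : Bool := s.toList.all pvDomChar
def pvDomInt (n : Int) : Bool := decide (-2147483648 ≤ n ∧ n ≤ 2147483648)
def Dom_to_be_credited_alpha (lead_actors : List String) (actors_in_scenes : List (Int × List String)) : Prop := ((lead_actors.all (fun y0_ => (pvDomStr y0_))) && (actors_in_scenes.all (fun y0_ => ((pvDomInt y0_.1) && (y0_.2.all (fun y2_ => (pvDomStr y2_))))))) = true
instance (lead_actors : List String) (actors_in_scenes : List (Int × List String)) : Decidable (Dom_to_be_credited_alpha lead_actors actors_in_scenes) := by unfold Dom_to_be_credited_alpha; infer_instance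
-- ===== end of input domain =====

-- B flattens all scene groups, sorts the whole multiset and dedups/filters in one
-- linear scan (sort-based dedup) instead of A's hash-set accumulation with a
-- per-element lead test; same return value, no argument mutation.

-- ===== PORT A =====
-- nested for-loops building a set with a per-actor membership branch, then sorted(actors)
def to_be_credited_alpha (lead_actors : List String) (actors_in_scenes : List (Int × List String)) : List String :=
  let actors : PySem.Set String :=
    actors_in_scenes.foldl (fun actors itemGroup =>
      itemGroup.2.foldl (fun actors actor =>
        if actor ∈ lead_actors then actors else PySem.Set.add actors actor) actors)
      PySem.Set.empty
  PySem.List.sorted actors (fun x => x) false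

-- ===== PORT B =====
-- flat.extend per scene, flat.sort(), then one scan: skip leads, suppress adjacent duplicates
def to_be_credited_alpha_alt (lead_actors : List String) (actors_in_scenes : List (Int × List String)) : List String :=
  let leads : PySem.Set String := PySem.Set.ofList lead_actors
  let flat : List String := actors_in_scenes.foldl (fun flat itemGroup => flat ++ itemGroup.2) []
  let flatSorted := PySem.List.sorted flat (fun x => x) false
  flatSorted.foldl (fun out a =>
    if a ∉ leads ∧ (out = [] ∨ out.getLast? ≠ some a) then out ++ [a] else out) []

-- ===== PRECONDITION & SPEC =====
def Spec_to_be_credited_alpha (lead_actors : List String) (actors_in_scenes : List (Int × List String)) (out : List String) : Prop := out = to_be_credited_alpha_alt lead_actors actors_in_scenes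
instance (lead_actors : List String) (actors_in_scenes : List (Int × List String)) (out : List String) : Decidable (Spec_to_be_credited_alpha lead_actors actors_in_scenes out) := by unfold Spec_to_be_credited_alpha; infer_instance

-- ===== CLAIM =====
def Claim_equal_to_be_credited_alpha : Prop := ∀ (lead_actors : List String) (actors_in_scenes : List (Int × List String)), Dom_to_be_credited_alpha lead_actors actors_in_scenes → Spec_to_be_credited_alpha lead_actors actors_in_scenes (to_be_credited_alpha lead_actors actors_in_scenes)

-- ===== LEMMAS AND PROOFS =====

-- A's inner loop: membership
lemma memA_inner (lead : List String) (group : List String) (s : PySem.Set String) (x : String) :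
    x ∈ group.foldl (fun acc a => if a ∈ lead then acc else PySem.Set.add acc a) s ↔
      x ∈ s ∨ (x ∈ group ∧ x ∉ lead) := by
  induction group generalizing s with
  | nil => simp
  | cons a t ih =>
    simp only [List.foldl_cons, ih, List.mem_cons]
    by_cases h : a ∈ lead
    · simp only [h, if_pos]
      constructor
      · rintro (hs | ⟨ht, hl⟩)
        exacts [Or.inl hs, Or.inr ⟨Or.inr ht, hl⟩]
      · rintro (hs | ⟨(rfl | ht), hl⟩)
        exacts [Or.inl hs, absurd h hl, Or.inr ⟨ht, hl⟩]
    · simp [h, PySem.Set.mem_add]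
      constructor
      · rintro ((hs | rfl) | ⟨ht, hl⟩) <;> tauto
      · rintro (hs | ⟨(rfl | ht), hl⟩) <;> tauto

lemma nodupA_inner (lead : List String) (group : List String) (s : PySem.Set String)
    (hs : s.Nodup) :
    (group.foldl (fun acc a => if a ∈ lead then acc else PySem.Set.add acc a) s).Nodup := by
  induction group generalizing s with
  | nil => simpa
  | cons a t ih =>
    simp only [List.foldl_cons]
    by_cases h : a ∈ lead
    · simp only [h, if_pos]; exact ih s hs
    · simp only [h, if_neg, not_false_iff]
      exact ih _ (PySem.Set.nodup_add _ _ hs)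

-- A's outer loop: membership
lemma memA (lead : List String) (scenes : List (Int × List String)) (s : PySem.Set String)
    (x : String) :
    x ∈ scenes.foldl (fun acc p =>
        p.2.foldl (fun acc a => if a ∈ lead then acc else PySem.Set.add acc a) acc) s ↔
      x ∈ s ∨ ((∃ p ∈ scenes, x ∈ p.2) ∧ x ∉ lead) := by
  induction scenes generalizing s with
  | nil => simp
  | cons p t ih =>
    simp only [List.foldl_cons, ih, memA_inner, List.mem_cons]
    constructor
    · rintro ((hs | ⟨hg, hl⟩) | ⟨⟨q, hq, hx⟩, hl⟩) <;> first
        | exact Or.inl hs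
        | exact Or.inr ⟨⟨p, Or.inl rfl, hg⟩, hl⟩
        | exact Or.inr ⟨⟨q, Or.inr hq, hx⟩, hl⟩
    · rintro (hs | ⟨⟨q, (rfl | hq), hx⟩, hl⟩) <;> first
        | exact Or.inl (Or.inl hs)
        | exact Or.inl (Or.inr ⟨hx, hl⟩)
        | exact Or.inr ⟨⟨q, hq, hx⟩, hl⟩

lemma nodupA (lead : List String) (scenes : List (Int × List String)) (s : PySem.Set String)
    (hs : s.Nodup) :
    (scenes.foldl (fun acc p =>
        p.2.foldl (fun acc a => if a ∈ lead then acc else PySem.Set.add acc a) acc) s).Nodup := by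
  induction scenes generalizing s with
  | nil => simpa
  | cons p t ih => exact ih _ (nodupA_inner lead p.2 s hs)

-- B's flatten loop
lemma flatB (scenes : List (Int × List String)) (init : List String) :
    scenes.foldl (fun acc p => acc ++ p.2) init = init ++ scenes.flatMap (·.2) := by
  induction scenes generalizing init with
  | nil => simp
  | cons p t ih => simp [ih, List.append_assoc]

-- in a strictly increasing list every element is ≤ the last
lemma le_getLast_of_pairwise_lt (l : List String) (z : String)
    (hp : l.Pairwise (· < ·)) (hz : l.getLast? = some z) : ∀ y ∈ l, y ≤ z := by
  intro y hy
  have hzm : z ∈ l := List.mem_of_getLast? hz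
  rcases (l.getLast?_eq_some_iff.mp hz) with ⟨l', rfl⟩
  rcases List.mem_append.mp hy with h | h
  · exact le_of_lt ((List.pairwise_append.mp hp).2.2 y h z (by simp))
  · simp_all

-- B's scan: on a ≤-sorted input with a compatible accumulator it stays strictly
-- increasing and collects exactly the non-lead elements
lemma scanB (leads : PySem.Set String) :
    ∀ (l out : List String), l.Pairwise (· ≤ ·) → out.Pairwise (· < ·) →
      (∀ z, out.getLast? = some z → ∀ x ∈ l, z ≤ x) →
      ((l.foldl (fun out a =>
          if a ∉ leads ∧ (out = [] ∨ out.getLast? ≠ some a) then out ++ [a] else out) out).Pairwise (· < ·)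
        ∧ ∀ x, x ∈ l.foldl (fun out a =>
          if a ∉ leads ∧ (out = [] ∨ out.getLast? ≠ some a) then out ++ [a] else out) out ↔
            x ∈ out ∨ (x ∈ l ∧ x ∉ leads)) := by
  intro l
  induction l with
  | nil => intro out _ hp _; simpa using hp
  | cons a t ih =>
    intro out hl hp hlast
    have hl' : t.Pairwise (· ≤ ·) := hl.of_cons
    have hat : ∀ x ∈ t, a ≤ x := fun _ hx => List.rel_of_pairwise_cons hl hx
    simp only [List.foldl_cons]
    by_cases hmem : a ∉ leads ∧ (out = [] ∨ out.getLast? ≠ some a)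
    · rw [if_pos hmem]
      have hlt : ∀ y ∈ out, y < a := by
        intro y hy
        rcases hout : out.getLast? with _ | z
        · simp [List.getLast?_eq_none_iff.mp hout] at hy
        · have hza : z ≤ a := hlast z hout a (by simp)
          have hzne : z ≠ a := by
            rcases hmem.2 with h | h
            · simp [h] at hout
            · intro hzz; exact h (hzz ▸ hout)
          exact lt_of_le_of_lt (le_getLast_of_pairwise_lt out z hp hout y hy)
            (lt_of_le_of_ne hza hzne)
      have hp' : (out ++ [a]).Pairwise (· < ·) := by
        rw [List.pairwise_append]
        exact ⟨hp, List.pairwise_singleton _ _, by simpa using hlt⟩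
      have hlast' : ∀ z, (out ++ [a]).getLast? = some z → ∀ x ∈ t, z ≤ x := by
        intro z hz
        simp only [List.getLast?_append, List.getLast?_singleton, Option.some_or] at hz
        cases hz; exact hat
      obtain ⟨h1, h2⟩ := ih (out ++ [a]) hl' hp' hlast'
      refine ⟨h1, fun x => ?_⟩
      rw [h2]
      simp only [List.mem_append, List.mem_cons, List.not_mem_nil, or_false]
      constructor
      · rintro ((h | rfl) | ⟨h, hn⟩) <;> tauto
      · rintro (h | ⟨(rfl | h), hn⟩) <;> tauto
    · rw [if_neg hmem]
      have hmem' : ¬ (a ∉ leads) ∨ ¬ (out = [] ∨ out.getLast? ≠ some a) := by tauto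
      have hlast' : ∀ z, out.getLast? = some z → ∀ x ∈ t, z ≤ x := by
        intro z hz x hx; exact hlast z hz x (List.mem_cons_of_mem _ hx)
      obtain ⟨h1, h2⟩ := ih out hl' hp hlast'
      refine ⟨h1, fun x => ?_⟩
      rw [h2]
      simp only [List.mem_cons]
      constructor
      · rintro (h | ⟨h, hn⟩) <;> tauto
      · rintro (h | ⟨(rfl | h), hn⟩)
        · tauto
        · -- x = a: either a ∈ leads (contradiction with hn) or a is out's last, hence in out
          rcases hmem' with h' | h'
          · exact absurd hn (by simpa using h')
          · push Not at h'
            obtain ⟨-, h'⟩ := h'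
            exact Or.inl (List.mem_of_getLast? h')
        · tauto

-- ===== VERDICT =====
theorem to_be_credited_alpha_spec : Claim_equal_to_be_credited_alpha := by
  intro lead scenes _
  show _ = _
  unfold to_be_credited_alpha to_be_credited_alpha_alt
  simp only [flatB]
  have hsorted := PySem.List.sorted_pairwise ([] ++ scenes.flatMap (fun p => p.2)) (fun x : String => x)
  obtain ⟨hpair, hmem⟩ := scanB (PySem.Set.ofList lead)
    (PySem.List.sorted ([] ++ scenes.flatMap (fun p => p.2)) (fun x => x) false) []
    (by simpa using hsorted) (List.Pairwise.nil) (by simp)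
  apply PySem.List.sorted_eq_of_perm_of_pairwise_lt
  · apply (List.perm_ext_iff_of_nodup (hpair.nodup) (nodupA lead scenes _ List.nodup_nil)).mpr
    intro x
    rw [hmem, memA]
    simp [PySem.List.mem_sorted, PySem.Set.mem_ofList, List.mem_flatMap]
  · exact hpair
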